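-- pv_equiv track=rewrite | github.com/cry999/AtCoder | beginner/061/C.py | big_array
-- ===== SOURCE A (Python) =====
-- def big_array(N: int, K: int, queries: list)->int:
--     d = {}
--     for a, b in queries:
--         d.setdefault(a, 0)
--         d[a] += b
--
--     count = 0
--     ans = 0
--     for k, v in sorted(d.items()):
--         count += v
--         if K <= count:
--             ans = k
--             break
--     return ans
-- ===== SOURCE B (Python) =====
-- def big_array(N: int, K: int, queries: list) -> int:
--     # dict-free: the answer is the first sorted distinct key a whose
--     # cumulative weight (sum of b over entries with key <= a) reaches K
--     for a in sorted({x for x, _ in queries}):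
--         if K <= sum(b for x, b in queries if x <= a):
--             return a
--     return 0
-- ===== Notes on version B (the rewrite author's own statement) =====
-- stated objective: simpler
-- what changed: Drops the dict-aggregation phase and the running-count/ans/break scan entirely: B returns the first sorted distinct key a whose cumulative weight sum(b for x,b in queries if x <= a) reaches K, computing each prefix weight directly by a scan of the raw list.
import Mathlib
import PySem

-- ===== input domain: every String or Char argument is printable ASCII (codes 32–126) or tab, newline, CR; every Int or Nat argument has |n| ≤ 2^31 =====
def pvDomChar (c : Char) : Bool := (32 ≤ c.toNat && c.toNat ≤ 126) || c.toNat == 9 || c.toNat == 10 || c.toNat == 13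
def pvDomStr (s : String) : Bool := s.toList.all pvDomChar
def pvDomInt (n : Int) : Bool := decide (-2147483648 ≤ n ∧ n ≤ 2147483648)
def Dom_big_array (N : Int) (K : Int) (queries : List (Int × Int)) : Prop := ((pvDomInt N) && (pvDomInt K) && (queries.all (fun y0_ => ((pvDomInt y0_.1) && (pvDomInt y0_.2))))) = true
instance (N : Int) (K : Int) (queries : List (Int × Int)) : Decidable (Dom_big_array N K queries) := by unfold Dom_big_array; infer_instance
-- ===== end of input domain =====

-- B drops A's dict-aggregation phase and running-count scan: it returns the first
-- sorted distinct key whose cumulative weight reaches K (objective: simpler).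

-- ===== PORT A =====
-- 'count = 0; ans = 0; for k, v in sorted(d.items()): count += v; if K <= count: ans = k; break'
def bigArrayScanA (K : Int) (count : Int) (ans : Int) : List (Int × Int) → Int
  | [] => ans
  | (k, v) :: t =>
    let count' := count + v
    if K ≤ count' then k else bigArrayScanA K count' ans t

def big_array (N : Int) (K : Int) (queries : List (Int × Int)) : Int :=
  -- d = {}; for a, b in queries: d.setdefault(a, 0); d[a] += b
  let d : PySem.Dict Int Int :=
    queries.foldl (fun d p => (d.setdefault p.1 0).modify p.1 0 (· + p.2)) PySem.Dict.empty
  bigArrayScanA K 0 0 (PySem.List.sorted2 d.items (·.1) (·.2))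

-- ===== PORT B =====
-- 'for a in sorted({x for x, _ in queries}): if K <= sum(b for x, b in queries if x <= a): return a
--  return 0'
def bigArrayScanB (K : Int) (queries : List (Int × Int)) : List Int → Int
  | [] => 0
  | a :: t =>
    if K ≤ ((queries.filter (fun p => p.1 ≤ a)).map (·.2)).sum then a
    else bigArrayScanB K queries t

def big_array_alt (N : Int) (K : Int) (queries : List (Int × Int)) : Int :=
  bigArrayScanB K queries
    (PySem.List.sorted (PySem.Set.ofList (queries.map (·.1))) (fun x => x) false)

-- ===== PRECONDITION & SPEC =====
def Spec_big_array (N : Int) (K : Int) (queries : List (Int × Int)) (out : Int) : Prop := out = big_array_alt N K queries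
instance (N : Int) (K : Int) (queries : List (Int × Int)) (out : Int) : Decidable (Spec_big_array N K queries out) := by unfold Spec_big_array; infer_instance

-- ===== CLAIM (what is proved, stated in full; the proofs are below) =====
def Claim_equal_big_array : Prop := ∀ (N : Int) (K : Int) (queries : List (Int × Int)), Dom_big_array N K queries → Spec_big_array N K queries (big_array N K queries)

-- ===== LEMMAS AND PROOFS =====

-- total weight of the entries of qs whose key is k (the value A's dict stores at k)
def sumKey (k : Int) (qs : List (Int × Int)) : Int :=
  ((qs.filter (fun p => p.1 == k)).map (·.2)).sum

-- 'd.setdefault(a, 0); d[a] += b' is a single modify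
theorem setdefault_modify (d : PySem.Dict Int Int) (a b : Int) :
    (d.setdefault a 0).modify a 0 (· + b) = d.modify a 0 (· + b) := by
  by_cases h : d.contains a = true
  · rw [PySem.Dict.setdefault_of_contains _ _ h]
  · rw [PySem.Dict.setdefault_of_not_contains _ _ (by simpa using h)]
    simp [PySem.Dict.modify, PySem.Dict.getD_insert_self, PySem.Dict.insert_insert_self,
      PySem.Dict.getD_of_not_contains _ _ (by simpa using h)]

-- the dict's value at k is sumKey k
theorem dict_getD (qs : List (Int × Int)) (d : PySem.Dict Int Int) (k : Int) :
    (qs.foldl (fun d p => d.modify p.1 0 (· + p.2)) d).getD k 0 = d.getD k 0 + sumKey k qs := by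
  induction qs generalizing d with
  | nil => simp [sumKey]
  | cons p t ih =>
    simp only [List.foldl_cons, ih, PySem.Dict.getD_modify]
    by_cases hk : k = p.1
    · simp [hk, sumKey, List.filter_cons]; ring
    · simp [hk, sumKey, Ne.symm hk]

-- the dict's keys are the distinct keys of qs in first-occurrence order
theorem dict_keys (qs : List (Int × Int)) :
    (qs.foldl (fun d p => d.modify p.1 0 (· + p.2)) PySem.Dict.empty).keys
      = PySem.Set.ofList (qs.map (·.1)) := by
  have h := PySem.Dict.keys_foldl_modify_key qs (fun p => p.1) (0 : Int)
      (fun _ p => (· + p.2)) PySem.Dict.empty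
  simpa [PySem.Dict.keys_empty, PySem.Set.update_empty] using h

-- insertBy only looks at 'before x ·' over the current accumulator
theorem insertBy_congr {α : Type} (b1 b2 : α → α → Bool) (x : α) (acc : List α)
    (h : ∀ y ∈ acc, b1 x y = b2 x y) :
    PySem.List.insertBy b1 x acc = PySem.List.insertBy b2 x acc := by
  induction acc with
  | nil => rfl
  | cons y ys ih =>
    simp only [PySem.List.insertBy]
    rw [h y (by simp)]
    by_cases hb : b2 x y = true
    · simp [hb]
    · simp only [Bool.not_eq_true] at hb
      simp [hb, ih (fun z hz => h z (by simp [hz]))]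

theorem foldl_insertBy_congr {α : Type} (b1 b2 : α → α → Bool) (l : List α)
    (acc : List α)
    (h : ∀ x ∈ l, ∀ y, (y ∈ acc ∨ y ∈ l) → b1 x y = b2 x y) :
    l.foldl (fun acc x => PySem.List.insertBy b1 x acc) acc
      = l.foldl (fun acc x => PySem.List.insertBy b2 x acc) acc := by
  induction l generalizing acc with
  | nil => rfl
  | cons x t ih =>
    simp only [List.foldl_cons]
    rw [insertBy_congr b1 b2 x acc (fun y hy => h x (by simp) y (Or.inl hy))]
    exact ih _ (fun z hz y hy => h z (by simp [hz]) y (by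
      rcases hy with hy | hy
      · rcases (PySem.List.mem_insertBy b2 x y acc).mp hy with rfl | hy
        · exact Or.inr (by simp)
        · exact Or.inl hy
      · exact Or.inr (by simp [hy])))

-- with pairwise-distinct first components, lexicographic pair sort = sort by first component
theorem sorted2_eq_sorted_fst (l : List (Int × Int)) (h : (l.map Prod.fst).Nodup) :
    PySem.List.sorted2 l (·.1) (·.2) = PySem.List.sorted l (·.1) false := by
  have hpw : l.Pairwise (fun a b : Int × Int => a.1 ≠ b.1) := by
    simpa [List.Nodup, List.pairwise_map] using h
  have hkey : ∀ x ∈ l, ∀ y ∈ l, x ≠ y → x.1 ≠ y.1 :=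
    List.Pairwise.forall (fun a b hab => Ne.symm hab) hpw
  rw [PySem.List.sorted_eq_foldl_insertBy]
  show l.foldl (fun acc x => PySem.List.insertBy _ x acc) [] = _
  apply foldl_insertBy_congr
  intro x hx y hy
  rcases hy with hy | hy
  · simp at hy
  by_cases hxy : x = y
  · subst hxy; simp
  · have hne := hkey x hx y hy hxy
    rcases lt_trichotomy x.1 y.1 with hlt | heq | hgt
    · simp [hlt, not_lt.mpr (le_of_lt hlt)]
    · exact absurd heq hne
    · simp [hgt, not_lt.mpr (le_of_lt hgt)]

theorem sum_map_indicator (x : Int) (w : Int) (L : List Int) (hnd : L.Nodup) :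
    (L.map (fun k => if x = k then w else 0)).sum = if x ∈ L then w else 0 := by
  induction L with
  | nil => simp
  | cons y t ih =>
    simp only [List.map_cons, List.sum_cons, List.mem_cons]
    rcases List.nodup_cons.mp hnd with ⟨hy, hnt⟩
    by_cases hxy : x = y
    · subst hxy
      simp [ih hnt, hy]
    · simp [hxy, ih hnt]

-- grouped prefix weight = raw prefix weight
theorem weight_eq (ks : List Int) (qs : List (Int × Int)) (a : Int)
    (hnd : ks.Nodup) (hcov : ∀ p ∈ qs, p.1 ∈ ks) :
    ((ks.filter (fun k => k ≤ a)).map (fun k => sumKey k qs)).sum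
      = ((qs.filter (fun p => p.1 ≤ a)).map (·.2)).sum := by
  induction qs with
  | nil => simp [sumKey]
  | cons p t ih =>
    have hcovt : ∀ q ∈ t, q.1 ∈ ks := fun q hq => hcov q (by simp [hq])
    have hsplit : ∀ k, sumKey k (p :: t) = (if p.1 = k then p.2 else 0) + sumKey k t := by
      intro k
      by_cases hk : p.1 = k
      · simp [sumKey, List.filter_cons, hk]
      · simp [sumKey, hk]
    rw [List.map_congr_left (fun k _ => hsplit k), List.sum_map_add] at *
    have hind : ((ks.filter (fun k => k ≤ a)).map (fun k => if p.1 = k then p.2 else 0)).sum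
        = if p.1 ≤ a then p.2 else 0 := by
      rw [sum_map_indicator _ _ _ (hnd.filter _)]
      by_cases hpa : p.1 ≤ a
      · simp [List.mem_filter, hpa, hcov p (by simp)]
      · simp [List.mem_filter, hpa]
    rw [hind, ih hcovt]
    by_cases hpa : p.1 ≤ a
    · simp [List.filter_cons, hpa]
    · simp [List.filter_cons, hpa]

theorem scanA_cons (K c ans k v : Int) (t : List (Int × Int)) :
    bigArrayScanA K c ans ((k, v) :: t)
      = if K ≤ c + v then k else bigArrayScanA K (c + v) ans t := rfl

-- the two scans agree under the prefix-weight invariant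
theorem scan_eq (K : Int) (qs : List (Int × Int)) (ks : List Int) (c : Int)
    (hs : ks.Pairwise (· < ·))
    (hw : ∀ a ∈ ks, c + ((ks.filter (fun k => k ≤ a)).map (fun k => sumKey k qs)).sum
            = ((qs.filter (fun p => p.1 ≤ a)).map (·.2)).sum) :
    bigArrayScanA K c 0 (ks.map (fun k => (k, sumKey k qs))) = bigArrayScanB K qs ks := by
  induction ks generalizing c with
  | nil => rfl
  | cons a t ih =>
    rcases List.pairwise_cons.mp hs with ⟨hlt, hst⟩
    have hfa : t.filter (fun k => k ≤ a) = [] :=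
      List.filter_eq_nil_iff.mpr (fun x hx => by simp [not_le.mpr (hlt x hx)])
    have hWa : c + sumKey a qs = ((qs.filter (fun p => p.1 ≤ a)).map (·.2)).sum := by
      have h := hw a (by simp)
      simpa [List.filter_cons, hfa] using h
    rw [List.map_cons, scanA_cons]
    show _ = if K ≤ ((qs.filter (fun p => p.1 ≤ a)).map (·.2)).sum then a else bigArrayScanB K qs t
    rw [← hWa]
    by_cases hK : K ≤ c + sumKey a qs
    · simp [hK]
    · simp only [hK, if_false]
      refine ih _ hst ?_
      intro a' ha'
      have h := hw a' (by simp [ha'])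
      have haa' : a ≤ a' := le_of_lt (hlt a' ha')
      rw [List.filter_cons] at h
      simpa [haa', add_assoc] using h

-- ===== VERDICT (by name: the statement is the Claim_ definition above) =====
theorem big_array_spec : Claim_equal_big_array := by
  intro N K queries _
  unfold Spec_big_array big_array big_array_alt
  have hstep : (fun (d : PySem.Dict Int Int) (p : Int × Int) =>
      (d.setdefault p.1 0).modify p.1 0 (· + p.2))
      = (fun d p => d.modify p.1 0 (· + p.2)) := by
    funext d p; exact setdefault_modify d p.1 p.2
  rw [hstep]
  set D := queries.foldl (fun d p => d.modify p.1 0 (· + p.2)) PySem.Dict.empty with hD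
  set K0 : List Int := PySem.Set.ofList (queries.map (·.1)) with hK0
  have hkeys : D.keys = K0 := dict_keys queries
  have hnodK0 : K0.Nodup := PySem.Set.nodup_ofList _
  have hitems : D.items = K0.map (fun k => (k, sumKey k queries)) := by
    rw [PySem.Dict.items_eq_map_keys D (hkeys ▸ hnodK0) 0, hkeys]
    apply List.map_congr_left
    intro k _
    rw [dict_getD]
    simp [PySem.Dict.getD_empty]
  set SK : List Int := PySem.List.sorted K0 (fun x => x) false with hSK
  have hsortedSK : SK.Pairwise (· < ·) := PySem.List.sorted_ofList_pairwise_lt _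
  have hperm : (SK.map (fun k => (k, sumKey k queries))).Perm D.items := by
    rw [hitems]
    exact (PySem.List.sorted_perm _ _ _).map _
  have hsorted2 : PySem.List.sorted2 D.items (·.1) (·.2)
      = SK.map (fun k => (k, sumKey k queries)) := by
    rw [sorted2_eq_sorted_fst D.items (by
      have : D.items.map Prod.fst = K0 := by
        simpa [PySem.Dict.keys] using hkeys
      rw [this]; exact hnodK0)]
    exact PySem.List.sorted_eq_of_perm_of_pairwise_lt _ _ _ hperm (by
      rw [List.pairwise_map]
      exact hsortedSK)
  show bigArrayScanA K 0 0 (PySem.List.sorted2 D.items (·.1) (·.2)) = bigArrayScanB K queries SK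
  rw [hsorted2]
  apply scan_eq K queries SK 0 hsortedSK
  intro a ha
  rw [zero_add]
  apply weight_eq SK queries a ((PySem.List.sorted_perm _ _ _).nodup_iff.mpr hnodK0)
  intro p hp
  have : p.1 ∈ K0 := (PySem.Set.mem_ofList _ _).mpr (List.mem_map_of_mem hp)
  simpa [hSK, PySem.List.mem_sorted] using this
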